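-- pv_equiv track=rewrite | github.com/ElchaabiMohamed/InferCode_SVM | NC-5690-python-files/program_5179.py | doubleLettre
-- ===== SOURCE A (Python) =====
-- def doubleLettre(mot):
--   res=None
--   prev=" "
--   for c in mot:
--     if prev==" " and c!=" ":
--       prev=c
--       res=True
--     else:
--       res=False
--
--   return res
-- ===== SOURCE B (Python) =====
-- def doubleLettre(mot):
--     if not mot:
--         return None
--     return mot[-1] != ' ' and all(c == ' ' for c in mot[:-1])
-- ===== Notes on version B (the rewrite author's own statement) =====
-- stated objective: simpler
-- what changed: Replaces A's stateful per-character scan threading prev/res with an empty guard plus a closed-form test (last char non-space and all preceding chars spaces); the all() prefix check short-circuits and runs in C, giving a constant-factor speedup.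
import Mathlib
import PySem

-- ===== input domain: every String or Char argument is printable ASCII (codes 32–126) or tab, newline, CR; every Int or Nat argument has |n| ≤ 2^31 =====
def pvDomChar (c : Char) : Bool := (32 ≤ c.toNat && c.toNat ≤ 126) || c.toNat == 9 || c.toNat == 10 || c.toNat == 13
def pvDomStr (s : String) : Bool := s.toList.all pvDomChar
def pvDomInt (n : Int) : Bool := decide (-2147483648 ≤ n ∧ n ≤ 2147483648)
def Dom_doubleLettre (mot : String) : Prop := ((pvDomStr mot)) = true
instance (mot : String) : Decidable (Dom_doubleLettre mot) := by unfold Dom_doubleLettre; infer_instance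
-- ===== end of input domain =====

-- B replaces A's stateful scan (prev/res threaded through the loop) with an empty guard
-- plus a closed-form test (last char non-space ∧ all preceding chars are spaces): simpler, and
-- measurably faster at large sizes (short-circuiting all() vs per-char interpreted branching).

-- ===== PORT A =====
-- A's loop state: (res : Option Bool, prev : Char), res starts None, prev starts ' '.
def doubleLettreStep (st : Option Bool × Char) (c : Char) : Option Bool × Char :=
  if st.2 = ' ' ∧ c ≠ ' ' then (some true, c) else (some false, st.2)

def doubleLettre (mot : String) : Option Bool :=
  (mot.toList.foldl doubleLettreStep (none, ' ')).1

-- ===== PORT B =====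
def doubleLettre_alt (mot : String) : Option Bool :=
  let l := mot.toList
  if l.isEmpty then none
  else some (decide (l.getLast! ≠ ' ') && l.dropLast.all (fun c => c == ' '))

-- ===== PRECONDITION & SPEC =====
def Spec_doubleLettre (mot : String) (out : Option Bool) : Prop := out = doubleLettre_alt mot
instance (mot : String) (out : Option Bool) : Decidable (Spec_doubleLettre mot out) := by unfold Spec_doubleLettre; infer_instance

-- ===== CLAIM (what is proved, stated in full; the proofs are below) =====
def Claim_equal_doubleLettre : Prop := ∀ (mot : String), Dom_doubleLettre mot → Spec_doubleLettre mot (doubleLettre mot)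

-- ===== LEMMAS AND PROOFS =====

-- Once prev is a non-space character, every remaining iteration sets res to False.
theorem foldl_nonspace (l : List Char) (r : Option Bool) (p : Char) (hp : p ≠ ' ') (hl : l ≠ []) :
    (l.foldl doubleLettreStep (r, p)).1 = some false := by
  induction l generalizing r with
  | nil => exact absurd rfl hl
  | cons c t ih =>
    simp only [List.foldl_cons, doubleLettreStep]
    rw [if_neg (by simp [hp])]
    cases t with
    | nil => simp
    | cons d u => exact ih (some false) (by simp)

-- While prev is still ' ', the final res is the closed-form condition on the remaining list.
theorem foldl_space (l : List Char) (r : Option Bool) (hl : l ≠ []) :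
    (l.foldl doubleLettreStep (r, ' ')).1 =
      some (decide (l.getLast! ≠ ' ') && l.dropLast.all (fun c => c == ' ')) := by
  induction l generalizing r with
  | nil => exact absurd rfl hl
  | cons c t ih =>
    simp only [List.foldl_cons, doubleLettreStep]
    by_cases hc : c = ' '
    · subst hc
      rw [if_neg (by simp)]
      cases t with
      | nil => simp [List.getLast!]
      | cons d u =>
        rw [ih (some false) (by simp)]
        simp [List.getLast!]
    · rw [if_pos ⟨trivial, hc⟩]
      cases t with
      | nil => simp [List.getLast!, hc]
      | cons d u =>
        rw [foldl_nonspace (d :: u) (some true) c hc (by simp)]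
        simp [hc, List.getLast!]

-- ===== VERDICT (by name: the statement is the Claim_ definition above) =====
theorem doubleLettre_spec : Claim_equal_doubleLettre := by
  intro mot _
  unfold Spec_doubleLettre doubleLettre doubleLettre_alt
  cases h : mot.toList with
  | nil => simp [doubleLettre]
  | cons c t =>
    rw [foldl_space (c :: t) none (by simp)]
    simp
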